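-- pv_equiv track=rewrite | github.com/Astro-Engine/Astro_Engine_ORGNL | astro_engine/engine/remedies/VedicGemstones.py | gemstone_classify_functional_nature
-- ===== SOURCE A (Python) =====
-- SIGNS = [
--     'Aries', 'Taurus', 'Gemini', 'Cancer', 'Leo', 'Virgo',
--     'Libra', 'Scorpio', 'Sagittarius', 'Capricorn', 'Aquarius', 'Pisces'
-- ]
--
-- YOGA_KARAKA = {
--     'Aries': 'Saturn',    # 10th + 11th lord
--     'Taurus': 'Saturn',   # 9th + 10th lord
--     'Gemini': 'Venus',    # 5th + 12th lord (weak yoga karaka)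
--     'Cancer': 'Mars',     # 5th + 10th lord
--     'Leo': 'Mars',        # 4th + 9th lord
--     'Virgo': 'Venus',     # 2nd + 9th lord (weak yoga karaka)
--     'Libra': 'Saturn',    # 4th + 5th lord
--     'Scorpio': None,      # No yoga karaka
--     'Sagittarius': None,  # No yoga karaka
--     'Capricorn': 'Venus', # 5th + 10th lord
--     'Aquarius': 'Venus',  # 4th + 9th lord
--     'Pisces': None        # No yoga karaka (Mars is debatable)
-- }
--
-- def gemstone_classify_functional_nature(planet_name, ruled_houses, asc_sign):
--     """
--     Classify functional nature of planet based on house lordships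
--     Enhanced version with clear reasoning
--     """
--     if not ruled_houses:
--         return ('NEUTRAL', [])
--
--     reasons = []
--     benefic_points = 0
--     malefic_points = 0
--
--     # Check for Yoga Karaka
--     yoga_karaka_planet = YOGA_KARAKA.get(SIGNS[asc_sign])
--     if yoga_karaka_planet == planet_name:
--         reasons.append(f"Yoga Karaka for {SIGNS[asc_sign]} Ascendant")
--         return ('YOGA_KARAKA', reasons)
--
--     for house in ruled_houses:
--         # Trikona (1, 5, 9) - Most benefic
--         if house in [1, 5, 9]:
--             if house == 1:
--                 reasons.append("Lagna lord (1st house)")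
--                 benefic_points += 3
--             elif house == 5:
--                 reasons.append("Lord of 5th (trikona)")
--                 benefic_points += 4
--             elif house == 9:
--                 reasons.append("Lord of 9th (most auspicious)")
--                 benefic_points += 5
--
--         # Kendra (1, 4, 7, 10)
--         elif house in [4, 7, 10]:
--             if house == 4:
--                 reasons.append("Lord of 4th (kendra)")
--                 benefic_points += 3
--             elif house == 7:
--                 reasons.append("Lord of 7th (maraka)")
--                 malefic_points += 2
--             elif house == 10:
--                 reasons.append("Lord of 10th (karma)")
--                 benefic_points += 3
--
--         # Upachaya (3, 6, 10, 11)
--         elif house == 3: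
--             reasons.append("Lord of 3rd (upachaya but mild malefic)")
--             malefic_points += 1
--         elif house == 11:
--             reasons.append("Lord of 11th (gains but also upachaya)")
--             benefic_points += 1
--
--         # Dusthana (6, 8, 12) - Malefic
--         elif house == 6:
--             reasons.append("Lord of 6th (dusthana)")
--             malefic_points += 4  # 6th is worst
--         elif house == 8:
--             reasons.append("Lord of 8th (dusthana)")
--             malefic_points += 3
--         elif house == 12:
--             reasons.append("Lord of 12th (dusthana)")
--             malefic_points += 2
--
--         # Maraka (2, 7)
--         elif house == 2:
--             reasons.append("Lord of 2nd (maraka)")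
--             malefic_points += 2
--
--     # Classification
--     if benefic_points >= 4 and malefic_points <= 2:
--         return ('HIGHLY_BENEFIC', reasons)
--     elif benefic_points >= 2 and malefic_points <= 1:
--         return ('BENEFIC', reasons)
--     elif malefic_points >= 4:
--         return ('MALEFIC', reasons)
--     elif malefic_points >= 2:
--         return ('MILD_MALEFIC', reasons)
--     else:
--         return ('NEUTRAL', reasons)
-- ===== SOURCE B (Python) =====
-- SIGNS = [
--     'Aries', 'Taurus', 'Gemini', 'Cancer', 'Leo', 'Virgo',
--     'Libra', 'Scorpio', 'Sagittarius', 'Capricorn', 'Aquarius', 'Pisces'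
-- ]
--
-- YOGA_KARAKA = {
--     'Aries': 'Saturn', 'Taurus': 'Saturn', 'Gemini': 'Venus', 'Cancer': 'Mars',
--     'Leo': 'Mars', 'Virgo': 'Venus', 'Libra': 'Saturn', 'Scorpio': None,
--     'Sagittarius': None, 'Capricorn': 'Venus', 'Aquarius': 'Venus', 'Pisces': None
-- }
--
-- # house -> (reason, benefic points, malefic points)
-- HOUSE_TABLE = {
--     1:  ("Lagna lord (1st house)", 3, 0),
--     2:  ("Lord of 2nd (maraka)", 0, 2),
--     3:  ("Lord of 3rd (upachaya but mild malefic)", 0, 1),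
--     4:  ("Lord of 4th (kendra)", 3, 0),
--     5:  ("Lord of 5th (trikona)", 4, 0),
--     6:  ("Lord of 6th (dusthana)", 0, 4),
--     7:  ("Lord of 7th (maraka)", 0, 2),
--     8:  ("Lord of 8th (dusthana)", 0, 3),
--     9:  ("Lord of 9th (most auspicious)", 5, 0),
--     10: ("Lord of 10th (karma)", 3, 0),
--     11: ("Lord of 11th (gains but also upachaya)", 1, 0),
--     12: ("Lord of 12th (dusthana)", 0, 2),
-- }
--
-- def gemstone_classify_functional_nature(planet_name, ruled_houses, asc_sign):
--     if not ruled_houses: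
--         return ('NEUTRAL', [])
--     sign = SIGNS[asc_sign]
--     if YOGA_KARAKA.get(sign) == planet_name:
--         return ('YOGA_KARAKA', ["Yoga Karaka for {} Ascendant".format(sign)])
--     # Points: instead of walking the input through a branch cascade, walk the
--     # fixed 12-row table once and weight each row by the multiplicity of its
--     # house in ruled_houses.  Correct because point totals are order-independent.
--     ben = sum(b * ruled_houses.count(h) for h, (_r, b, _m) in HOUSE_TABLE.items())
--     mal = sum(m * ruled_houses.count(h) for h, (_r, _b, m) in HOUSE_TABLE.items())
--     # Reasons must keep the input order: one filter+map comprehension.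
--     reasons = [HOUSE_TABLE[h][0] for h in ruled_houses if h in HOUSE_TABLE]
--     if ben >= 4 and mal <= 2:
--         return ('HIGHLY_BENEFIC', reasons)
--     if ben >= 2 and mal <= 1:
--         return ('BENEFIC', reasons)
--     if mal >= 4:
--         return ('MALEFIC', reasons)
--     if mal >= 2:
--         return ('MILD_MALEFIC', reasons)
--     return ('NEUTRAL', reasons)
-- ===== Notes on version B (the rewrite author's own statement) =====
-- stated objective: alternative
-- what changed: A accumulates reasons and both point totals in one pass through a nine-branch cascade; B computes the point totals by iterating over the fixed 12-row house table weighted by each house's multiplicity in the input (ruled_houses.count), and builds the reasons list separately as a filter+map comprehension, exploiting that point totals are order-independent.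
import Mathlib
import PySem

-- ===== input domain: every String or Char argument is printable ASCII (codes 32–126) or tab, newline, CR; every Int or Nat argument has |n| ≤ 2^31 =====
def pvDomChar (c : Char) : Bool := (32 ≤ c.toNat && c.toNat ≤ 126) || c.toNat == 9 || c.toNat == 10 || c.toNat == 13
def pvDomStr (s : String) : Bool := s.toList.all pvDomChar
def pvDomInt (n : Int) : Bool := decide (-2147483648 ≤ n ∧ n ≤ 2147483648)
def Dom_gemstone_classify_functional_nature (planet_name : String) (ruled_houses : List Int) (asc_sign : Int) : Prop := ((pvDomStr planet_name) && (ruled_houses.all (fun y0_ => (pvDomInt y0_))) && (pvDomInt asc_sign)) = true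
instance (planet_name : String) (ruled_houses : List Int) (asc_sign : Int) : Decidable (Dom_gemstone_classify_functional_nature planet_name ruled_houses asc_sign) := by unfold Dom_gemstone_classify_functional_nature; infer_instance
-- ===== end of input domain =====

-- B computes point totals by iterating the fixed 12-row house table weighted by each house's
-- multiplicity in the input, and builds reasons as a separate filter+map pass; objective: alternative.


-- ===== PORT A =====
def pvSIGNS : List String :=
  ["Aries", "Taurus", "Gemini", "Cancer", "Leo", "Virgo",
   "Libra", "Scorpio", "Sagittarius", "Capricorn", "Aquarius", "Pisces"]

def pvYOGA_KARAKA : PySem.Dict String (Option String) := PySem.Dict.ofList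
  [("Aries", some "Saturn"), ("Taurus", some "Saturn"), ("Gemini", some "Venus"),
   ("Cancer", some "Mars"), ("Leo", some "Mars"), ("Virgo", some "Venus"),
   ("Libra", some "Saturn"), ("Scorpio", none), ("Sagittarius", none),
   ("Capricorn", some "Venus"), ("Aquarius", some "Venus"), ("Pisces", none)]

-- A's loop body: the if/elif cascade, step for step
def pvStepA (st : List String × Int × Int) (house : Int) : List String × Int × Int :=
  let (reasons, ben, mal) := st
  if house ∈ ([1, 5, 9] : List Int) then
    if house = 1 then (reasons ++ ["Lagna lord (1st house)"], ben + 3, mal)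
    else if house = 5 then (reasons ++ ["Lord of 5th (trikona)"], ben + 4, mal)
    else if house = 9 then (reasons ++ ["Lord of 9th (most auspicious)"], ben + 5, mal)
    else (reasons, ben, mal)
  else if house ∈ ([4, 7, 10] : List Int) then
    if house = 4 then (reasons ++ ["Lord of 4th (kendra)"], ben + 3, mal)
    else if house = 7 then (reasons ++ ["Lord of 7th (maraka)"], ben, mal + 2)
    else if house = 10 then (reasons ++ ["Lord of 10th (karma)"], ben + 3, mal)
    else (reasons, ben, mal)
  else if house = 3 then (reasons ++ ["Lord of 3rd (upachaya but mild malefic)"], ben, mal + 1)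
  else if house = 11 then (reasons ++ ["Lord of 11th (gains but also upachaya)"], ben + 1, mal)
  else if house = 6 then (reasons ++ ["Lord of 6th (dusthana)"], ben, mal + 4)
  else if house = 8 then (reasons ++ ["Lord of 8th (dusthana)"], ben, mal + 3)
  else if house = 12 then (reasons ++ ["Lord of 12th (dusthana)"], ben, mal + 2)
  else if house = 2 then (reasons ++ ["Lord of 2nd (maraka)"], ben, mal + 2)
  else (reasons, ben, mal)

def gemstone_classify_functional_nature (planet_name : String) (ruled_houses : List Int) (asc_sign : Int) : String × List String :=
  if ruled_houses = [] then ("NEUTRAL", [])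
  else
    match PySem.List.pyGet? pvSIGNS asc_sign with
    | none => ("NEUTRAL", [])  -- Python raises IndexError here; excluded by Pre_
    | some sign =>
      if (PySem.Dict.get? pvYOGA_KARAKA sign).join = some planet_name then
        ("YOGA_KARAKA", ["Yoga Karaka for " ++ sign ++ " Ascendant"])
      else
        let st := ruled_houses.foldl pvStepA ([], 0, 0)
        let reasons := st.1; let ben := st.2.1; let mal := st.2.2
        if ben ≥ 4 ∧ mal ≤ 2 then ("HIGHLY_BENEFIC", reasons)
        else if ben ≥ 2 ∧ mal ≤ 1 then ("BENEFIC", reasons)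
        else if mal ≥ 4 then ("MALEFIC", reasons)
        else if mal ≥ 2 then ("MILD_MALEFIC", reasons)
        else ("NEUTRAL", reasons)

-- ===== PORT B =====
-- B's table: house -> (reason, benefic points, malefic points)
def pvHOUSE_TABLE : PySem.Dict Int (String × Int × Int) := PySem.Dict.ofList
  [(1, ("Lagna lord (1st house)", 3, 0)),
   (2, ("Lord of 2nd (maraka)", 0, 2)),
   (3, ("Lord of 3rd (upachaya but mild malefic)", 0, 1)),
   (4, ("Lord of 4th (kendra)", 3, 0)),
   (5, ("Lord of 5th (trikona)", 4, 0)),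
   (6, ("Lord of 6th (dusthana)", 0, 4)),
   (7, ("Lord of 7th (maraka)", 0, 2)),
   (8, ("Lord of 8th (dusthana)", 0, 3)),
   (9, ("Lord of 9th (most auspicious)", 5, 0)),
   (10, ("Lord of 10th (karma)", 3, 0)),
   (11, ("Lord of 11th (gains but also upachaya)", 1, 0)),
   (12, ("Lord of 12th (dusthana)", 0, 2))]

def gemstone_classify_functional_nature_alt (planet_name : String) (ruled_houses : List Int) (asc_sign : Int) : String × List String :=
  if ruled_houses = [] then ("NEUTRAL", [])
  else
    match PySem.List.pyGet? pvSIGNS asc_sign with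
    | none => ("NEUTRAL", [])  -- Python raises IndexError here; excluded by Pre_
    | some sign =>
      if (PySem.Dict.get? pvYOGA_KARAKA sign).join = some planet_name then
        ("YOGA_KARAKA", ["Yoga Karaka for " ++ sign ++ " Ascendant"])
      else
        -- ben/mal: one pass over the table's items, each row weighted by count
        let ben := ((PySem.Dict.items pvHOUSE_TABLE).map
          (fun r => r.2.2.1 * (PySem.List.count ruled_houses r.1 : Int))).sum
        let mal := ((PySem.Dict.items pvHOUSE_TABLE).map
          (fun r => r.2.2.2 * (PySem.List.count ruled_houses r.1 : Int))).sum
        -- reasons: filter+map comprehension (getD is exact: filter guarantees the key is present)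
        let reasons := (ruled_houses.filter (fun h => PySem.Dict.contains pvHOUSE_TABLE h)).map
          (fun h => (PySem.Dict.getD pvHOUSE_TABLE h ("", 0, 0)).1)
        if ben ≥ 4 ∧ mal ≤ 2 then ("HIGHLY_BENEFIC", reasons)
        else if ben ≥ 2 ∧ mal ≤ 1 then ("BENEFIC", reasons)
        else if mal ≥ 4 then ("MALEFIC", reasons)
        else if mal ≥ 2 then ("MILD_MALEFIC", reasons)
        else ("NEUTRAL", reasons)

-- ===== PRECONDITION & SPEC =====
-- Pre_ excludes exactly the inputs on which Python A raises IndexError at SIGNS[asc_sign]: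
-- a nonempty ruled_houses with asc_sign outside -12..11 (Python's negative indices wrap).
def Pre_gemstone_classify_functional_nature (planet_name : String) (ruled_houses : List Int) (asc_sign : Int) : Prop :=
  ruled_houses = [] ∨ (-12 ≤ asc_sign ∧ asc_sign < 12)
instance (planet_name : String) (ruled_houses : List Int) (asc_sign : Int) : Decidable (Pre_gemstone_classify_functional_nature planet_name ruled_houses asc_sign) := by unfold Pre_gemstone_classify_functional_nature; infer_instance

def pvWitness_gemstone_classify_functional_nature : String × List Int × Int := ("Sun", [1, 6], 0)

def Spec_gemstone_classify_functional_nature (planet_name : String) (ruled_houses : List Int) (asc_sign : Int) (out : String × List String) : Prop := out = gemstone_classify_functional_nature_alt planet_name ruled_houses asc_sign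
instance (planet_name : String) (ruled_houses : List Int) (asc_sign : Int) (out : String × List String) : Decidable (Spec_gemstone_classify_functional_nature planet_name ruled_houses asc_sign out) := by unfold Spec_gemstone_classify_functional_nature; infer_instance

-- ===== CLAIM (what is proved, stated in full; the proofs are below) =====
def Claim_equal_gemstone_classify_functional_nature : Prop := ∀ (planet_name : String) (ruled_houses : List Int) (asc_sign : Int), Dom_gemstone_classify_functional_nature planet_name ruled_houses asc_sign → Pre_gemstone_classify_functional_nature planet_name ruled_houses asc_sign → Spec_gemstone_classify_functional_nature planet_name ruled_houses asc_sign (gemstone_classify_functional_nature planet_name ruled_houses asc_sign)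

-- ===== LEMMAS AND PROOFS =====

-- per-house characterisations of A's cascade
def pvLabelOf (h : Int) : Option String :=
  if h = 1 then some "Lagna lord (1st house)"
  else if h = 2 then some "Lord of 2nd (maraka)"
  else if h = 3 then some "Lord of 3rd (upachaya but mild malefic)"
  else if h = 4 then some "Lord of 4th (kendra)"
  else if h = 5 then some "Lord of 5th (trikona)"
  else if h = 6 then some "Lord of 6th (dusthana)"
  else if h = 7 then some "Lord of 7th (maraka)"
  else if h = 8 then some "Lord of 8th (dusthana)"
  else if h = 9 then some "Lord of 9th (most auspicious)"
  else if h = 10 then some "Lord of 10th (karma)"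
  else if h = 11 then some "Lord of 11th (gains but also upachaya)"
  else if h = 12 then some "Lord of 12th (dusthana)"
  else none

def pvBenOf (h : Int) : Int :=
  if h = 1 then 3 else if h = 4 then 3 else if h = 5 then 4 else if h = 9 then 5
  else if h = 10 then 3 else if h = 11 then 1 else 0

def pvMalOf (h : Int) : Int :=
  if h = 2 then 2 else if h = 3 then 1 else if h = 6 then 4 else if h = 7 then 2
  else if h = 8 then 3 else if h = 12 then 2 else 0

-- the table's pair list, exposed for the proofs
def pvRowsL : List (Int × (String × Int × Int)) :=
  [(1, ("Lagna lord (1st house)", 3, 0)),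
   (2, ("Lord of 2nd (maraka)", 0, 2)),
   (3, ("Lord of 3rd (upachaya but mild malefic)", 0, 1)),
   (4, ("Lord of 4th (kendra)", 3, 0)),
   (5, ("Lord of 5th (trikona)", 4, 0)),
   (6, ("Lord of 6th (dusthana)", 0, 4)),
   (7, ("Lord of 7th (maraka)", 0, 2)),
   (8, ("Lord of 8th (dusthana)", 0, 3)),
   (9, ("Lord of 9th (most auspicious)", 5, 0)),
   (10, ("Lord of 10th (karma)", 3, 0)),
   (11, ("Lord of 11th (gains but also upachaya)", 1, 0)),
   (12, ("Lord of 12th (dusthana)", 0, 2))]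

lemma pvTABLE_mk : pvHOUSE_TABLE = PySem.Dict.mk pvRowsL := by decide
lemma pvItems : PySem.Dict.items pvHOUSE_TABLE = pvRowsL := by decide

lemma pvStepA_char (rs : List String) (b m : Int) (x : Int) :
    pvStepA (rs, b, m) x = (rs ++ (pvLabelOf x).toList, b + pvBenOf x, m + pvMalOf x) := by
  by_cases h1 : x = 1
  · subst h1; simp [pvStepA, pvLabelOf, pvBenOf, pvMalOf]
  by_cases h2 : x = 2
  · subst h2; simp [pvStepA, pvLabelOf, pvBenOf, pvMalOf]
  by_cases h3 : x = 3
  · subst h3; simp [pvStepA, pvLabelOf, pvBenOf, pvMalOf]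
  by_cases h4 : x = 4
  · subst h4; simp [pvStepA, pvLabelOf, pvBenOf, pvMalOf]
  by_cases h5 : x = 5
  · subst h5; simp [pvStepA, pvLabelOf, pvBenOf, pvMalOf]
  by_cases h6 : x = 6
  · subst h6; simp [pvStepA, pvLabelOf, pvBenOf, pvMalOf]
  by_cases h7 : x = 7
  · subst h7; simp [pvStepA, pvLabelOf, pvBenOf, pvMalOf]
  by_cases h8 : x = 8
  · subst h8; simp [pvStepA, pvLabelOf, pvBenOf, pvMalOf]
  by_cases h9 : x = 9
  · subst h9; simp [pvStepA, pvLabelOf, pvBenOf, pvMalOf]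
  by_cases h10 : x = 10
  · subst h10; simp [pvStepA, pvLabelOf, pvBenOf, pvMalOf]
  by_cases h11 : x = 11
  · subst h11; simp [pvStepA, pvLabelOf, pvBenOf, pvMalOf]
  by_cases h12 : x = 12
  · subst h12; simp [pvStepA, pvLabelOf, pvBenOf, pvMalOf]
  simp [pvStepA, pvLabelOf, pvBenOf, pvMalOf, h1, h2, h3, h4, h5, h6, h7, h8, h9, h10, h11, h12]

lemma pvFoldA (xs : List Int) (rs : List String) (b m : Int) :
    xs.foldl pvStepA (rs, b, m) =
      (rs ++ xs.flatMap (fun h => (pvLabelOf h).toList),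
       b + (xs.map pvBenOf).sum, m + (xs.map pvMalOf).sum) := by
  induction xs generalizing rs b m with
  | nil => simp
  | cons x t ih => simp [List.foldl_cons, pvStepA_char, ih, List.flatMap_cons, add_assoc]

lemma pvReasons_eq (xs : List Int) :
    xs.flatMap (fun h => (pvLabelOf h).toList) =
      (xs.filter (fun h => PySem.Dict.contains pvHOUSE_TABLE h)).map
        (fun h => (PySem.Dict.getD pvHOUSE_TABLE h ("", 0, 0)).1) := by
  induction xs with
  | nil => rfl
  | cons x t ih =>
    rw [List.flatMap_cons, List.filter_cons, ih]
    by_cases h1 : x = 1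
    · subst h1; simp [pvLabelOf, pvTABLE_mk, pvRowsL, PySem.Dict.contains, PySem.Dict.getD, PySem.Dict.get?]
    by_cases h2 : x = 2
    · subst h2; simp [pvLabelOf, pvTABLE_mk, pvRowsL, PySem.Dict.contains, PySem.Dict.getD, PySem.Dict.get?]
    by_cases h3 : x = 3
    · subst h3; simp [pvLabelOf, pvTABLE_mk, pvRowsL, PySem.Dict.contains, PySem.Dict.getD, PySem.Dict.get?]
    by_cases h4 : x = 4
    · subst h4; simp [pvLabelOf, pvTABLE_mk, pvRowsL, PySem.Dict.contains, PySem.Dict.getD, PySem.Dict.get?]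
    by_cases h5 : x = 5
    · subst h5; simp [pvLabelOf, pvTABLE_mk, pvRowsL, PySem.Dict.contains, PySem.Dict.getD, PySem.Dict.get?]
    by_cases h6 : x = 6
    · subst h6; simp [pvLabelOf, pvTABLE_mk, pvRowsL, PySem.Dict.contains, PySem.Dict.getD, PySem.Dict.get?]
    by_cases h7 : x = 7
    · subst h7; simp [pvLabelOf, pvTABLE_mk, pvRowsL, PySem.Dict.contains, PySem.Dict.getD, PySem.Dict.get?]
    by_cases h8 : x = 8
    · subst h8; simp [pvLabelOf, pvTABLE_mk, pvRowsL, PySem.Dict.contains, PySem.Dict.getD, PySem.Dict.get?]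
    by_cases h9 : x = 9
    · subst h9; simp [pvLabelOf, pvTABLE_mk, pvRowsL, PySem.Dict.contains, PySem.Dict.getD, PySem.Dict.get?]
    by_cases h10 : x = 10
    · subst h10; simp [pvLabelOf, pvTABLE_mk, pvRowsL, PySem.Dict.contains, PySem.Dict.getD, PySem.Dict.get?]
    by_cases h11 : x = 11
    · subst h11; simp [pvLabelOf, pvTABLE_mk, pvRowsL, PySem.Dict.contains, PySem.Dict.getD, PySem.Dict.get?]
    by_cases h12 : x = 12
    · subst h12; simp [pvLabelOf, pvTABLE_mk, pvRowsL, PySem.Dict.contains, PySem.Dict.getD, PySem.Dict.get?]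
    simp [pvLabelOf, pvTABLE_mk, pvRowsL, PySem.Dict.contains, PySem.Dict.getD, PySem.Dict.get?, h1, h2, h3, h4, h5, h6, h7, h8, h9, h10, h11, h12, Ne.symm h1, Ne.symm h2, Ne.symm h3, Ne.symm h4, Ne.symm h5, Ne.symm h6, Ne.symm h7, Ne.symm h8, Ne.symm h9, Ne.symm h10, Ne.symm h11, Ne.symm h12]

lemma pvBen_eq (xs : List Int) :
    ((PySem.Dict.items pvHOUSE_TABLE).map
      (fun r => r.2.2.1 * (PySem.List.count xs r.1 : Int))).sum = (xs.map pvBenOf).sum := by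
  induction xs with
  | nil => simp [pvItems, pvRowsL, PySem.List.count]
  | cons x t ih =>
    simp only [pvItems, pvRowsL, List.map_cons, List.map_nil, List.sum_cons, List.sum_nil,
      PySem.List.count, List.count_cons] at ih ⊢
    by_cases h1 : x = 1
    · subst h1; simp only [beq_iff_eq]; simp [pvBenOf]; push_cast at ih ⊢; omega
    by_cases h2 : x = 2
    · subst h2; simp only [beq_iff_eq]; simp [pvBenOf]; push_cast at ih ⊢; omega
    by_cases h3 : x = 3
    · subst h3; simp only [beq_iff_eq]; simp [pvBenOf]; push_cast at ih ⊢; omega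
    by_cases h4 : x = 4
    · subst h4; simp only [beq_iff_eq]; simp [pvBenOf]; push_cast at ih ⊢; omega
    by_cases h5 : x = 5
    · subst h5; simp only [beq_iff_eq]; simp [pvBenOf]; push_cast at ih ⊢; omega
    by_cases h6 : x = 6
    · subst h6; simp only [beq_iff_eq]; simp [pvBenOf]; push_cast at ih ⊢; omega
    by_cases h7 : x = 7
    · subst h7; simp only [beq_iff_eq]; simp [pvBenOf]; push_cast at ih ⊢; omega
    by_cases h8 : x = 8
    · subst h8; simp only [beq_iff_eq]; simp [pvBenOf]; push_cast at ih ⊢; omega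
    by_cases h9 : x = 9
    · subst h9; simp only [beq_iff_eq]; simp [pvBenOf]; push_cast at ih ⊢; omega
    by_cases h10 : x = 10
    · subst h10; simp only [beq_iff_eq]; simp [pvBenOf]; push_cast at ih ⊢; omega
    by_cases h11 : x = 11
    · subst h11; simp only [beq_iff_eq]; simp [pvBenOf]; push_cast at ih ⊢; omega
    by_cases h12 : x = 12
    · subst h12; simp only [beq_iff_eq]; simp [pvBenOf]; push_cast at ih ⊢; omega
    simp only [beq_iff_eq]; simp [pvBenOf, h1, h2, h3, h4, h5, h6, h7, h8, h9, h10, h11, h12, Ne.symm h1, Ne.symm h2, Ne.symm h3, Ne.symm h4, Ne.symm h5, Ne.symm h6, Ne.symm h7, Ne.symm h8, Ne.symm h9, Ne.symm h10, Ne.symm h11, Ne.symm h12]; push_cast at ih ⊢; omega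

lemma pvMal_eq (xs : List Int) :
    ((PySem.Dict.items pvHOUSE_TABLE).map
      (fun r => r.2.2.2 * (PySem.List.count xs r.1 : Int))).sum = (xs.map pvMalOf).sum := by
  induction xs with
  | nil => simp [pvItems, pvRowsL, PySem.List.count]
  | cons x t ih =>
    simp only [pvItems, pvRowsL, List.map_cons, List.map_nil, List.sum_cons, List.sum_nil,
      PySem.List.count, List.count_cons] at ih ⊢
    by_cases h1 : x = 1
    · subst h1; simp only [beq_iff_eq]; simp [pvMalOf]; push_cast at ih ⊢; omega
    by_cases h2 : x = 2
    · subst h2; simp only [beq_iff_eq]; simp [pvMalOf]; push_cast at ih ⊢; omega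
    by_cases h3 : x = 3
    · subst h3; simp only [beq_iff_eq]; simp [pvMalOf]; push_cast at ih ⊢; omega
    by_cases h4 : x = 4
    · subst h4; simp only [beq_iff_eq]; simp [pvMalOf]; push_cast at ih ⊢; omega
    by_cases h5 : x = 5
    · subst h5; simp only [beq_iff_eq]; simp [pvMalOf]; push_cast at ih ⊢; omega
    by_cases h6 : x = 6
    · subst h6; simp only [beq_iff_eq]; simp [pvMalOf]; push_cast at ih ⊢; omega
    by_cases h7 : x = 7
    · subst h7; simp only [beq_iff_eq]; simp [pvMalOf]; push_cast at ih ⊢; omega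
    by_cases h8 : x = 8
    · subst h8; simp only [beq_iff_eq]; simp [pvMalOf]; push_cast at ih ⊢; omega
    by_cases h9 : x = 9
    · subst h9; simp only [beq_iff_eq]; simp [pvMalOf]; push_cast at ih ⊢; omega
    by_cases h10 : x = 10
    · subst h10; simp only [beq_iff_eq]; simp [pvMalOf]; push_cast at ih ⊢; omega
    by_cases h11 : x = 11
    · subst h11; simp only [beq_iff_eq]; simp [pvMalOf]; push_cast at ih ⊢; omega
    by_cases h12 : x = 12
    · subst h12; simp only [beq_iff_eq]; simp [pvMalOf]; push_cast at ih ⊢; omega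
    simp only [beq_iff_eq]; simp [pvMalOf, h1, h2, h3, h4, h5, h6, h7, h8, h9, h10, h11, h12, Ne.symm h1, Ne.symm h2, Ne.symm h3, Ne.symm h4, Ne.symm h5, Ne.symm h6, Ne.symm h7, Ne.symm h8, Ne.symm h9, Ne.symm h10, Ne.symm h11, Ne.symm h12]; push_cast at ih ⊢; omega

-- ===== VERDICT (by name: the statement is the Claim_ definition above) =====
theorem gemstone_classify_functional_nature_spec : Claim_equal_gemstone_classify_functional_nature := by
  intro planet_name ruled_houses asc_sign _ _
  unfold Spec_gemstone_classify_functional_nature gemstone_classify_functional_nature gemstone_classify_functional_nature_alt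
  rw [pvFoldA, pvReasons_eq, pvBen_eq, pvMal_eq]
  simp
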